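-- pv_equiv track=rewrite | github.com/nrybowski/ns3-sim | myscripts/bird/spfs.py | gen_addresses
-- ===== SOURCE A (Python) =====
-- def gen_addresses(n: int) -> list:
--     high = 0
--     low = 1
--
--     addresses = []
--
--     for i in range(n):
--             if low > 250:
--                     high += 1
--                     low = 1
--             addresses.append('10.1.%i.%i' % (high, low))
--             low += 1
--
--     return addresses
-- ===== SOURCE B (Python) =====
-- def gen_addresses(n: int) -> list:
--     return ['10.1.%i.%i' % (i // 250, i % 250 + 1) for i in range(n)]
-- ===== Notes on version B (the rewrite author's own statement) =====
-- stated objective: simpler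
-- what changed: Replaces the stateful high/low counters with their carry-reset branch by a single comprehension computing each address directly from its index via i//250 and i%250+1.
import Mathlib
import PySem

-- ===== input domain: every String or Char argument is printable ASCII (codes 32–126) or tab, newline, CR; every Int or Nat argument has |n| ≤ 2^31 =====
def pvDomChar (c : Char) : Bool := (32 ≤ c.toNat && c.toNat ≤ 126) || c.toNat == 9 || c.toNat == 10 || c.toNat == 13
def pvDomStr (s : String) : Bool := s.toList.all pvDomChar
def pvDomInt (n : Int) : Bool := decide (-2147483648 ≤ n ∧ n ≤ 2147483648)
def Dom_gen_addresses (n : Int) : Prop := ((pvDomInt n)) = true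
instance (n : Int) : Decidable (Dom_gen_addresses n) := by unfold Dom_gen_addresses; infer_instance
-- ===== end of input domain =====

-- B replaces A's stateful high/low counters and carry branch by direct index arithmetic
-- (i//250, i%250+1) in one comprehension; equivalence of the return value is proved below.

-- shared formatting of '10.1.%i.%i' % (h, l)
def fmtAddr (h l : Int) : String :=
  PySem.Str.join "" ["10.1.", PySem.Int.toStr h, ".", PySem.Int.toStr l]

-- ===== PORT A =====
def gen_addresses (n : Int) : List String :=
  ((PySem.List.pyRange 0 n 1).foldl
    (fun (st : Int × Int × List String) (_i : Int) =>
      let high := st.1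
      let low := st.2.1
      let addresses := st.2.2
      let high' := if low > 250 then high + 1 else high
      let low' := if low > 250 then (1 : Int) else low
      (high', low' + 1, addresses ++ [fmtAddr high' low']))
    (0, 1, [])).2.2

-- ===== PORT B =====
def gen_addresses_alt (n : Int) : List String :=
  (PySem.List.pyRange 0 n 1).map
    (fun i => fmtAddr (PySem.Int.floordiv i 250) (PySem.Int.mod i 250 + 1))

-- ===== PRECONDITION & SPEC =====
def Spec_gen_addresses (n : Int) (out : List String) : Prop := out = gen_addresses_alt n
instance (n : Int) (out : List String) : Decidable (Spec_gen_addresses n out) := by unfold Spec_gen_addresses; infer_instance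

-- ===== CLAIM (what is proved, stated in full; the proofs are below) =====
def Claim_equal_gen_addresses : Prop := ∀ (n : Int), Dom_gen_addresses n → Spec_gen_addresses n (gen_addresses n)

-- ===== LEMMAS AND PROOFS =====

-- A's loop body
def stepA (st : Int × Int × List String) (_i : Int) : Int × Int × List String :=
  let high := st.1
  let low := st.2.1
  let addresses := st.2.2
  let high' := if low > 250 then high + 1 else high
  let low' := if low > 250 then (1 : Int) else low
  (high', low' + 1, addresses ++ [fmtAddr high' low'])

-- state of A after k iterations
def hofA (k : Nat) : Int := if k = 0 then 0 else PySem.Int.floordiv ((k : Int) - 1) 250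
def lofA (k : Nat) : Int := if k = 0 then 1 else PySem.Int.mod ((k : Int) - 1) 250 + 2

lemma invA (k : Nat) :
    (PySem.List.pyRange 0 (k : Int) 1).foldl stepA ((0 : Int), (1 : Int), ([] : List String)) =
      (hofA k, lofA k,
        (PySem.List.pyRange 0 (k : Int) 1).map
          (fun i => fmtAddr (PySem.Int.floordiv i 250) (PySem.Int.mod i 250 + 1))) := by
  induction k with
  | zero => simp [hofA, lofA]
  | succ k ih =>
    have hk : ((k + 1 : Nat) : Int) = (k : Int) + 1 := by push_cast; ring
    rw [hk, PySem.List.pyRange_one_succ_right (show (0:Int) ≤ (k:Int) by positivity),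
        List.foldl_append, List.map_append, ih]
    simp only [List.foldl_cons, List.foldl_nil, List.map_cons, List.map_nil]
    have hdpos : (0 : Int) < 250 := by norm_num
    rcases Nat.eq_zero_or_pos k with h0 | hpos
    · subst h0
      simp [stepA, hofA, lofA]
    · have hk0 : k ≠ 0 := hpos.ne'
      simp only [stepA, hofA, lofA, if_neg hk0, if_neg (Nat.succ_ne_zero k),
        PySem.Int.floordiv_eq_ediv_of_pos hdpos, PySem.Int.mod_eq_emod_of_pos hdpos]
      have hmlt : ((k : Int) - 1) % 250 < 250 := Int.emod_lt_of_pos _ hdpos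
      have hmge : (0:Int) ≤ ((k : Int) - 1) % 250 := Int.emod_nonneg _ (by norm_num)
      by_cases hc : ((k : Int) - 1) % 250 + 2 > 250
      · rw [if_pos hc, if_pos hc]
        have h1 : (k : Int) / 250 = ((k : Int) - 1) / 250 + 1 := by omega
        have h2 : (k : Int) % 250 = 0 := by omega
        have h3 : (k : Int) + 1 - 1 = (k : Int) := by ring
        simp [h1, h2, h3]
      · rw [if_neg hc, if_neg hc]
        have h1 : (k : Int) / 250 = ((k : Int) - 1) / 250 := by omega
        have h2 : (k : Int) % 250 = ((k : Int) - 1) % 250 + 1 := by omega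
        have h3 : (k : Int) + 1 - 1 = (k : Int) := by ring
        simp [h1, h2, h3]
        exact ⟨by ring, congrArg _ (by ring)⟩


-- ===== VERDICT (by name: the statement is the Claim_ definition above) =====
theorem gen_addresses_spec : Claim_equal_gen_addresses := by
  intro n _
  show gen_addresses n = gen_addresses_alt n
  unfold gen_addresses gen_addresses_alt
  by_cases hn : n ≤ 0
  · rw [PySem.List.pyRange_one_eq_nil hn]; rfl
  · have hn' : n = (n.toNat : Int) := (Int.toNat_of_nonneg (by omega)).symm
    rw [hn']
    have := invA n.toNat
    rw [show ((PySem.List.pyRange 0 ((n.toNat : Nat) : Int) 1).foldl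
      (fun (st : Int × Int × List String) (_i : Int) =>
        let high := st.1
        let low := st.2.1
        let addresses := st.2.2
        let high' := if low > 250 then high + 1 else high
        let low' := if low > 250 then (1 : Int) else low
        (high', low' + 1, addresses ++ [fmtAddr high' low'])) (0, 1, [])) =
      ((PySem.List.pyRange 0 ((n.toNat : Nat) : Int) 1).foldl stepA (0, 1, [])) from rfl, this]
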